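-- pv_equiv track=rewrite | github.com/sam676/PythonPracticeProblems | Robin/hungryNumber.py | hungryNumbers
-- ===== SOURCE A (Python) =====
-- def hungryNumbers(hungryNums):
--     fullNums = []
--     for x in range(len(hungryNums)):
--         if (x == 0) and (hungryNums[x] > hungryNums[x+1]):
--             fullNums.append(hungryNums[0] + hungryNums[x+1])
--         else:
--             fullNums.append(hungryNums[x])
--     return fullNums
-- ===== SOURCE B (Python) =====
-- def hungryNumbers(hungryNums):
--     # Build the answer back-to-front: walk the list from the last element down
--     # to index 1 appending each element, handle the head case once at the end,
--     # then reverse the accumulator.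
--     out = []
--     i = len(hungryNums) - 1
--     while i >= 1:
--         out.append(hungryNums[i])
--         i -= 1
--     if hungryNums:
--         if hungryNums[0] > hungryNums[1]:
--             out.append(hungryNums[0] + hungryNums[1])
--         else:
--             out.append(hungryNums[0])
--     out.reverse()
--     return out
-- ===== Notes on version B (the rewrite author's own statement) =====
-- stated objective: alternative
-- what changed: B builds the result back-to-front: a while loop walks from the last index down to 1 appending elements, the head special case is handled once after the loop, and the accumulator is reversed; A walks forward over range(len()) testing x==0 on every iteration.
-- outside the precondition, e.g. on hungryNumbers([1]): A raises IndexError, B raises IndexError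
import Mathlib
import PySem

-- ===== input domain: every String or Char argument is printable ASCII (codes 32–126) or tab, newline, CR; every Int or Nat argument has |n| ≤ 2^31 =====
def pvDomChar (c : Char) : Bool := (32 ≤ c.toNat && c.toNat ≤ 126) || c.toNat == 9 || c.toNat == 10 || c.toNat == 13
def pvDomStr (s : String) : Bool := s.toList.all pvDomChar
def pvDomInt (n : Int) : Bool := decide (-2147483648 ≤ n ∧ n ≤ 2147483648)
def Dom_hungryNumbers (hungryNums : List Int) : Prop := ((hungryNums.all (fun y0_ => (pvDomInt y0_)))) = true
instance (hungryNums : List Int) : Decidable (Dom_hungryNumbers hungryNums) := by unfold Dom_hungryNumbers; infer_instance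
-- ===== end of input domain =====

-- B builds the result back-to-front (while loop from the last index down to 1, head case once after the loop, final reverse) instead of A's forward range(len()) loop testing x==0 each step (objective: alternative).

-- ===== PORT A =====
-- literal port of A's loop: for x in range(len(l)): append l[0]+l[x+1] when x==0 and l[x]>l[x+1], else l[x]
def hungryNumbers (hungryNums : List Int) : List Int :=
  (PySem.List.pyRange 0 (PySem.List.len hungryNums) 1).foldl
    (fun fullNums x =>
      if x = 0 ∧ PySem.List.pyGetD hungryNums x 0 > PySem.List.pyGetD hungryNums (x + 1) 0 then
        fullNums ++ [PySem.List.pyGetD hungryNums 0 0 + PySem.List.pyGetD hungryNums (x + 1) 0]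
      else
        fullNums ++ [PySem.List.pyGetD hungryNums x 0]) []

-- ===== PORT B =====
-- the while loop 'while i >= 1: out.append(l[i]); i -= 1', counter as a Nat (i starts at len-1 ≥ 0;
-- on an empty list Python's i = -1 and the loop never runs, matched by Nat i = 0)
def hungryWhile (l : List Int) (i : Nat) (out : List Int) : List Int :=
  match i with
  | 0 => out
  | n + 1 => hungryWhile l n (out ++ [PySem.List.pyGetD l ((n + 1 : Nat) : Int) 0])

-- literal port of B: backward while loop, then the guarded head append, then reverse
-- (xs[1] ported via pyGetD; Pre_ excludes the singleton input on which the Python l[1] raises)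
def hungryNumbers_alt (hungryNums : List Int) : List Int :=
  let out := hungryWhile hungryNums (hungryNums.length - 1) []
  let out :=
    if hungryNums ≠ [] then
      if PySem.List.pyGetD hungryNums 0 0 > PySem.List.pyGetD hungryNums 1 0 then
        out ++ [PySem.List.pyGetD hungryNums 0 0 + PySem.List.pyGetD hungryNums 1 0]
      else
        out ++ [PySem.List.pyGetD hungryNums 0 0]
    else out
  out.reverse

-- ===== PRECONDITION & SPEC =====
-- Pre_ excludes exactly the singleton lists: on them both Pythons raise IndexError (l[1] with len(l) == 1).
def Pre_hungryNumbers (hungryNums : List Int) : Prop := hungryNums.length ≠ 1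
instance (hungryNums : List Int) : Decidable (Pre_hungryNumbers hungryNums) := by
  unfold Pre_hungryNumbers; infer_instance
def pvWitness_hungryNumbers : List Int := [3, 1, 4]

def Spec_hungryNumbers (hungryNums : List Int) (out : List Int) : Prop := out = hungryNumbers_alt hungryNums
instance (hungryNums : List Int) (out : List Int) : Decidable (Spec_hungryNumbers hungryNums out) := by
  unfold Spec_hungryNumbers; infer_instance

-- ===== CLAIM (what is proved, stated in full; the proofs are below) =====
def Claim_equal_hungryNumbers : Prop := ∀ (hungryNums : List Int), Dom_hungryNumbers hungryNums → Pre_hungryNumbers hungryNums → Spec_hungryNumbers hungryNums (hungryNumbers hungryNums)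

-- ===== LEMMAS AND PROOFS =====

-- A's loop body, named so the tail lemma can speak about it (definitionally the lambda in hungryNumbers)
def hungryBody (l : List Int) (fullNums : List Int) (x : Int) : List Int :=
  if x = 0 ∧ PySem.List.pyGetD l x 0 > PySem.List.pyGetD l (x + 1) 0 then
    fullNums ++ [PySem.List.pyGetD l 0 0 + PySem.List.pyGetD l (x + 1) 0]
  else
    fullNums ++ [PySem.List.pyGetD l x 0]

-- folding A's body over indices k, k+1, …, len-1 (k ≥ 1) just copies the tail of l
theorem hungry_tail_fold (l : List Int) (k : Nat) (acc : List Int) (hk : 1 ≤ k) :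
    (PySem.List.pyRange (k : Int) (PySem.List.len l) 1).foldl (hungryBody l) acc
      = acc ++ l.drop k := by
  by_cases h : k < l.length
  · have hlt : (k : Int) < PySem.List.len l := by
      simp [PySem.List.len_eq]; exact_mod_cast h
    rw [PySem.List.pyRange_one_cons hlt]
    have hb : hungryBody l acc (k : Int) = acc ++ [l[k]] := by
      unfold hungryBody
      rw [if_neg (by rintro ⟨h0, -⟩; omega)]
      rw [PySem.List.pyGetD_natCast, List.getD_eq_getElem _ _ h]
    have hcast : ((k : Int) + 1) = ((k + 1 : Nat) : Int) := by push_cast; ring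
    rw [List.foldl_cons, hb, hcast, hungry_tail_fold l (k + 1) (acc ++ [l[k]]) (by omega)]
    rw [List.append_assoc]
    congr 1
    rw [List.singleton_append]
    exact List.getElem_cons_drop h
  · rw [PySem.List.pyRange_one_eq_nil
      (by simp [PySem.List.len_eq]; exact_mod_cast Nat.le_of_not_lt h)]
    simp [List.drop_eq_nil_of_le (Nat.le_of_not_lt h)]
termination_by l.length - k

-- B's while loop collects l[i], l[i-1], …, l[1]: the reversed slice of l between 1 and i+1
theorem hungryWhile_eq (l : List Int) (i : Nat) (out : List Int) (hi : i < l.length) :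
    hungryWhile l i out = out ++ ((l.take (i + 1)).drop 1).reverse := by
  induction i generalizing out with
  | zero => rw [hungryWhile]; simp
  | succ n ih =>
    rw [hungryWhile]
    have hget : PySem.List.pyGetD l ((n + 1 : Nat) : Int) 0 = l[n + 1] := by
      rw [PySem.List.pyGetD_natCast, List.getD_eq_getElem _ _ hi]
    rw [ih _ (by omega)]
    have htake : l.take (n + 1 + 1) = l.take (n + 1) ++ [l[n + 1]] :=
      List.take_succ_eq_append_getElem (by omega)
    rw [htake, List.drop_append_of_le_length (by simp; omega)]
    simp
    rw [show ((n : Int) + 1) = ((n + 1 : Nat) : Int) by push_cast; ring]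
    exact hget

-- ===== VERDICT (by name: the statement is the Claim_ definition above) =====
theorem hungryNumbers_spec : Claim_equal_hungryNumbers := by
  intro l _ hpre
  unfold Spec_hungryNumbers
  match l, hpre with
  | [], _ => decide
  | [_], hpre => exact absurd rfl hpre
  | a :: b :: rest, _ =>
    -- A's side: first iteration, then the tail copy
    unfold hungryNumbers
    have hpos : (0 : Int) < PySem.List.len (a :: b :: rest) := by simp [pysem]; omega
    rw [PySem.List.pyRange_one_cons hpos, List.foldl_cons]
    show (PySem.List.pyRange ((0:Int) + 1) (PySem.List.len (a :: b :: rest)) 1).foldl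
        (hungryBody (a :: b :: rest)) (hungryBody (a :: b :: rest) [] 0) = _
    rw [show ((0:Int) + 1) = ((1 : Nat) : Int) by norm_num,
      hungry_tail_fold (a :: b :: rest) 1 _ (le_refl 1)]
    -- B's side: the while loop yields the reversed tail, one head append, final reverse
    unfold hungryNumbers_alt
    have hw : hungryWhile (a :: b :: rest) ((a :: b :: rest).length - 1) []
        = (b :: rest).reverse := by
      rw [hungryWhile_eq _ _ _ (by simp),
        show (a :: b :: rest).length - 1 + 1 = (a :: b :: rest).length by simp]
      simp
    have h0 : PySem.List.pyGetD (a::b::rest) 0 0 = a := by simp [pysem]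
    have h1 : PySem.List.pyGetD (a::b::rest) 1 0 = b := by simp [pysem]
    have h01 : PySem.List.pyGetD (a::b::rest) ((0:Int)+1) 0 = b := by norm_num [h1]
    simp only [hw, h0, h1, ne_eq, reduceCtorEq, not_false_eq_true, if_true]
    unfold hungryBody
    rw [h0, h01]
    by_cases hab : b < a
    · rw [if_pos ⟨rfl, hab⟩, if_pos hab]
      simp
    · rw [if_neg (by omega), if_neg (by omega)]
      simp
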